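-- pv_equiv track=rewrite | github.com/Yu-Qi-hang/ASD | evaluate.py | mergeclip
-- ===== SOURCE A (Python) =====
-- def mergeclip(mylist=[],threshold=5):
-- 	for i in range(len(mylist)-1):
-- 		if mylist[i]==mylist[i+1]:
-- 			continue
-- 		else:
-- 			cnt = 1
-- 			while True:
-- 				if i+cnt > len(mylist)-2:
-- 					break
-- 				if mylist[i] != mylist[i+cnt]:
-- 					cnt = cnt+1
-- 				else:
-- 					break
-- 			if i+cnt > len(mylist)-2:
-- 				break
-- 			if cnt < threshold:
-- 				for idx in range(cnt):
-- 					mylist[i+idx+1]=mylist[i]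
-- 	return mylist
-- ===== SOURCE B (Python) =====
-- def mergeclip(mylist=[], threshold=5):
--     # Same in-place gap filling as the original, but done in one left-to-right
--     # pass: the next occurrence of each value is precomputed in a single
--     # backward sweep instead of being rescanned for at each boundary.
--     n = len(mylist)
--     nxt = [None] * n
--     last = {}
--     for i in range(n - 1, -1, -1):
--         nxt[i] = last.get(mylist[i])
--         last[mylist[i]] = i
--     i = 0
--     while i < n - 1:
--         if mylist[i] == mylist[i + 1]:
--             i += 1
--             continue
--         j = nxt[i]
--         if j is None or j > n - 2:
--             break
--         cnt = j - i
--         if cnt < threshold: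
--             for idx in range(cnt):
--                 mylist[i + idx + 1] = mylist[i]
--             i = j
--         else:
--             i += 1
--     return mylist
-- ===== Notes on version B (the rewrite author's own statement) =====
-- stated objective: alternative
-- what changed: Replaced A's per-boundary forward rescan for the next equal element by a next-occurrence table built in one backward dict sweep, consumed in a single forward pass.
import Mathlib
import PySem

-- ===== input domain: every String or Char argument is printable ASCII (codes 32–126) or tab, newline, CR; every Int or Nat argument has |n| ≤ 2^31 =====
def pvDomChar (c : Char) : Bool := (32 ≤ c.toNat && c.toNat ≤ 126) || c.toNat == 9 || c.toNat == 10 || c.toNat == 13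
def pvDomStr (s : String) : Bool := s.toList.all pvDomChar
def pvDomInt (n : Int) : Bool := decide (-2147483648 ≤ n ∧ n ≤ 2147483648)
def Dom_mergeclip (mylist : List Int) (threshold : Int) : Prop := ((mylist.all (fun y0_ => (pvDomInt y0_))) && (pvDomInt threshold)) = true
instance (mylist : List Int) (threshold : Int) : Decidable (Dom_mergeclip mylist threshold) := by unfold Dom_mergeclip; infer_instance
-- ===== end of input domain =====

-- B replaces A's repeated forward rescans by a next-occurrence table built in one
-- backward sweep plus a single forward pass (objective: alternative algorithm).
-- In Python both A and B mutate `mylist` in place in the same way; the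
-- theorems below are about the returned value (= the final list state).

-- ===== PORT A =====
-- A's inner `while True`: returns the final value of cnt.
-- All list reads happen at in-range non-negative indices, so getD is exact here.
def mergeclipScan (l : List Int) (i cnt : Nat) : Nat :=
  if (i + cnt : Int) > (l.length : Int) - 2 then cnt
  else if l.getD i 0 ≠ l.getD (i + cnt) 0 then mergeclipScan l i (cnt + 1)
  else cnt
termination_by l.length - i - cnt
decreasing_by omega

-- A's `for idx in range(cnt): mylist[i+idx+1] = mylist[i]`
def mergeclipFill (l : List Int) (i cnt : Nat) : List Int :=
  (List.range cnt).foldl (fun acc idx => acc.set (i + idx + 1) (acc.getD i 0)) l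

-- A's outer `for i in range(len(mylist)-1)` carrying the mutated list
def mergeclipLoop (l : List Int) (threshold : Int) (i stop : Nat) : List Int :=
  if i < stop then
    if l.getD i 0 == l.getD (i + 1) 0 then mergeclipLoop l threshold (i + 1) stop
    else
      if (i + mergeclipScan l i 1 : Int) > (l.length : Int) - 2 then l
      else if (mergeclipScan l i 1 : Int) < threshold then
        mergeclipLoop (mergeclipFill l i (mergeclipScan l i 1)) threshold (i + 1) stop
      else mergeclipLoop l threshold (i + 1) stop
  else l
termination_by stop - i
decreasing_by all_goals omega

def mergeclip (mylist : List Int) (threshold : Int) : List Int :=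
  mergeclipLoop mylist threshold 0 (mylist.length - 1)

-- ===== PORT B =====
-- B's backward sweep `for i in range(n-1,-1,-1): nxt[i] = last.get(mylist[i]); last[mylist[i]] = i`,
-- assigning the nxt entries from right to left
def mergeclipNxtAux (l : List Int) (last : PySem.Dict Int Nat) (i : Nat)
    (acc : List (Option Nat)) : List (Option Nat) :=
  match i with
  | 0 => acc
  | i' + 1 =>
      mergeclipNxtAux l (last.insert (l.getD i' 0) i') i' ((last.get? (l.getD i' 0)) :: acc)

-- B's `for idx in range(cnt): mylist[i+idx+1] = mylist[i]`  (cnt = j - i)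
def mergeclipAltFill (l : List Int) (i cnt : Nat) : List Int :=
  (List.range cnt).foldl (fun acc idx => acc.set (i + idx + 1) (acc.getD i 0)) l

-- B's `while i < n - 1` loop; the `i < j` guard only makes termination evident
-- (the nxt table always points strictly forward), it adds no algorithmic branch
def mergeclipAltLoop (l : List Int) (nxt : List (Option Nat)) (threshold : Int)
    (i n : Nat) : List Int :=
  if i + 1 < n then
    if l.getD i 0 == l.getD (i + 1) 0 then mergeclipAltLoop l nxt threshold (i + 1) n
    else
      match nxt.getD i none with
      | none => l
      | some j =>
          if (j : Int) > (n : Int) - 2 then l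
          else if ((j : Int) - (i : Int)) < threshold then
            if _h : i < j then
              mergeclipAltLoop (mergeclipAltFill l i (j - i)) nxt threshold j n
            else l
          else mergeclipAltLoop l nxt threshold (i + 1) n
  else l
termination_by n - i
decreasing_by all_goals omega

def mergeclip_alt (mylist : List Int) (threshold : Int) : List Int :=
  mergeclipAltLoop mylist
    (mergeclipNxtAux mylist PySem.Dict.empty mylist.length []) threshold 0 mylist.length

-- ===== PRECONDITION & SPEC =====
def Spec_mergeclip (mylist : List Int) (threshold : Int) (out : List Int) : Prop := out = mergeclip_alt mylist threshold
instance (mylist : List Int) (threshold : Int) (out : List Int) : Decidable (Spec_mergeclip mylist threshold out) := by unfold Spec_mergeclip; infer_instance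

-- ===== CLAIM (what is proved, stated in full; the proofs are below) =====
def Claim_equal_mergeclip : Prop := ∀ (mylist : List Int) (threshold : Int), Dom_mergeclip mylist threshold → Spec_mergeclip mylist threshold (mergeclip mylist threshold)

-- ===== LEMMAS AND PROOFS =====

-- spec helper: the first index m ≥ i with l[m] = v
def firstIdxFrom (l : List Int) (i : Nat) (v : Int) : Option Nat :=
  if i < l.length then
    (if l.getD i 0 = v then some i else firstIdxFrom l (i + 1) v)
  else none
termination_by l.length - i
decreasing_by omega

theorem firstIdxFrom_bounds {l : List Int} {i : Nat} {v : Int} {j : Nat}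
    (h : firstIdxFrom l i v = some j) : i ≤ j ∧ j < l.length ∧ l.getD j 0 = v := by
  fun_induction firstIdxFrom l i v with
  | case1 i h1 h2 => simp_all
  | case2 i h1 h2 ih => have := ih h; exact ⟨by omega, this.2⟩
  | case3 i h1 => simp_all

-- agreement of the two lists from position i on transfers firstIdxFrom
theorem firstIdxFrom_congr {l l' : List Int} {i : Nat} (v : Int)
    (hlen : l.length = l'.length)
    (hag : ∀ k, i ≤ k → l.getD k 0 = l'.getD k 0) :
    firstIdxFrom l i v = firstIdxFrom l' i v := by
  fun_induction firstIdxFrom l i v with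
  | case1 i h1 h2 =>
      have hi' : i < l'.length := by rw [← hlen]; exact h1
      have hv : l'.getD i 0 = v := by rw [← hag i le_rfl]; exact h2
      conv_rhs => rw [firstIdxFrom, if_pos hi', if_pos hv]
  | case2 i h1 h2 ih =>
      have hi' : i < l'.length := by rw [← hlen]; exact h1
      have hv : ¬ l'.getD i 0 = v := by rw [← hag i le_rfl]; exact h2
      conv_rhs => rw [firstIdxFrom, if_pos hi', if_neg hv]
      exact ih (fun k hk => hag k (by omega))
  | case3 i h1 =>
      have hi' : ¬ i < l'.length := by rw [← hlen]; exact h1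
      conv_rhs => rw [firstIdxFrom, if_neg hi']

-- the dict `last` of B's backward sweep is exactly firstIdxFrom at each step
theorem mergeclipNxtAux_spec (l : List Int) : ∀ (i : Nat) (last : PySem.Dict Int Nat)
    (acc : List (Option Nat)), i ≤ l.length →
    (∀ v, last.get? v = firstIdxFrom l i v) →
    mergeclipNxtAux l last i acc
      = (List.range i).map (fun p => firstIdxFrom l (p + 1) (l.getD p 0)) ++ acc := by
  intro i
  induction i with
  | zero => intro last acc _ _; simp [mergeclipNxtAux]
  | succ i' ih =>
      intro last acc hi hlast
      rw [mergeclipNxtAux]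
      rw [ih _ _ (by omega) ?_]
      · rw [List.range_succ]
        simp [hlast]
      · intro v
        rw [PySem.Dict.get?_insert]
        by_cases hv : v = l.getD i' 0
        · subst hv
          conv_rhs => rw [firstIdxFrom, if_pos (by omega), if_pos rfl]
          simp
        · simp only [if_neg hv, hlast v]
          conv_rhs => rw [firstIdxFrom, if_pos (by omega)]
          rw [if_neg (fun h => hv h.symm)]

theorem mergeclipNxt_getD (l : List Int) (p : Nat) (hp : p < l.length) :
    (mergeclipNxtAux l PySem.Dict.empty l.length []).getD p none
      = firstIdxFrom l (p + 1) (l.getD p 0) := by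
  rw [mergeclipNxtAux_spec l l.length PySem.Dict.empty [] le_rfl ?_]
  · rw [List.append_nil]
    rw [List.getD_eq_getElem?_getD]
    rw [List.getElem?_map]
    simp [hp]
  · intro v
    rw [PySem.Dict.get?_empty]
    conv_rhs => rw [firstIdxFrom, if_neg (by omega)]

-- A's forward rescan finds exactly the first later occurrence (when it is ≤ n-2) …
theorem mergeclipScan_found {l : List Int} {i cnt j : Nat}
    (h : firstIdxFrom l (i + cnt) (l.getD i 0) = some j)
    (hj : (j : Int) ≤ (l.length : Int) - 2) :
    mergeclipScan l i cnt = j - i := by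
  fun_induction mergeclipScan l i cnt generalizing j with
  | case1 cnt h1 =>
      have := firstIdxFrom_bounds h
      omega
  | case2 cnt h1 h2 ih =>
      rw [firstIdxFrom, if_pos (by omega)] at h
      rw [if_neg (fun he => h2 he.symm)] at h
      have : i + cnt + 1 = i + (cnt + 1) := by omega
      rw [this] at h
      have := ih h hj
      have hb := firstIdxFrom_bounds h
      omega
  | case3 cnt h1 h2 =>
      rw [firstIdxFrom, if_pos (by omega), if_pos ((not_not.mp h2).symm)] at h
      simp at h
      omega

-- … and otherwise runs into the `break` bound
theorem mergeclipScan_bound {l : List Int} {i cnt : Nat}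
    (h : ∀ j, firstIdxFrom l (i + cnt) (l.getD i 0) = some j → (j : Int) > (l.length : Int) - 2) :
    (i + mergeclipScan l i cnt : Int) > (l.length : Int) - 2 := by
  fun_induction mergeclipScan l i cnt with
  | case1 cnt h1 => exact_mod_cast h1
  | case2 cnt h1 h2 ih =>
      apply ih
      intro j hjj
      apply h j
      rw [firstIdxFrom, if_pos (by omega), if_neg (fun he => h2 he.symm)]
      have : i + cnt + 1 = i + (cnt + 1) := by omega
      rw [this]
      exact hjj
  | case3 cnt h1 h2 =>
      exfalso
      have hself : firstIdxFrom l (i + cnt) (l.getD i 0) = some (i + cnt) := by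
        rw [firstIdxFrom, if_pos (by omega), if_pos ((not_not.mp h2).symm)]
      have := h _ hself
      omega

theorem mergeclipFill_length (l : List Int) (i cnt : Nat) :
    (mergeclipFill l i cnt).length = l.length := by
  suffices h : ∀ (xs : List Nat) (l : List Int),
      (xs.foldl (fun acc idx => acc.set (i + idx + 1) (acc.getD i 0)) l).length = l.length by
    exact h (List.range cnt) l
  intro xs
  induction xs with
  | nil => intro l; rfl
  | cons x xs ih => intro l; rw [List.foldl_cons, ih, List.length_set]

theorem mergeclipFill_succ (l : List Int) (i cnt : Nat) :
    mergeclipFill l i (cnt + 1)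
      = (mergeclipFill l i cnt).set (i + cnt + 1) ((mergeclipFill l i cnt).getD i 0) := by
  unfold mergeclipFill
  rw [List.range_succ, List.foldl_append, List.foldl_cons, List.foldl_nil]

theorem mergeclipFill_getD (l : List Int) (i : Nat) : ∀ (cnt : Nat), i + cnt < l.length →
    ∀ (k : Nat), (mergeclipFill l i cnt).getD k 0
      = if i < k ∧ k ≤ i + cnt then l.getD i 0 else l.getD k 0 := by
  intro cnt
  induction cnt with
  | zero =>
      intro _ k
      rw [if_neg (by omega)]
      rfl
  | succ cnt ih =>
      intro hin k
      rw [mergeclipFill_succ]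
      have hlen := mergeclipFill_length l i cnt
      have hi : (mergeclipFill l i cnt).getD i 0 = l.getD i 0 := by
        rw [ih (by omega) i, if_neg (by omega)]
      rw [hi]
      rcases eq_or_ne k (i + cnt + 1) with hk | hk
      · subst hk
        rw [if_pos (by omega)]
        rw [List.getD_eq_getElem?_getD, List.getElem?_set_self (by omega)]
        rfl
      · rw [List.getD_eq_getElem?_getD, List.getElem?_set_ne (by omega), ← List.getD_eq_getElem?_getD,
          ih (by omega) k]
        by_cases hik : i < k ∧ k ≤ i + cnt
        · rw [if_pos hik, if_pos (by omega)]
        · rw [if_neg hik, if_neg (by omega)]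

-- A's loop walks through a constant stretch with `continue`s
theorem mergeclipLoop_skip (l : List Int) (t : Int) (stop : Nat) : ∀ (d i j : Nat), j - i ≤ d → i ≤ j →
    j ≤ stop → (∀ m, i ≤ m → m < j → l.getD m 0 = l.getD (m + 1) 0) →
    mergeclipLoop l t i stop = mergeclipLoop l t j stop := by
  intro d
  induction d with
  | zero => intro i j h1 h2 _ _; have : i = j := by omega
            rw [this]
  | succ d ih =>
      intro i j h1 h2 h3 heq
      rcases eq_or_ne i j with rfl | hne
      · rfl
      · conv_lhs => rw [mergeclipLoop]
        rw [if_pos (by omega), if_pos (beq_iff_eq.mpr (heq i le_rfl (by omega)))]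
        exact ih (i + 1) j (by omega) (by omega) h3 (fun m hm hm' => heq m (by omega) hm')

-- main bridge: A's loop equals B's loop over the next-occurrence table of the
-- original list l0, as long as the current list agrees with l0 from position i on
theorem mergeclip_bridge (l0 : List Int) (t : Int) : ∀ (d i : Nat) (l : List Int),
    l0.length - i ≤ d → l.length = l0.length → (∀ k, i ≤ k → l.getD k 0 = l0.getD k 0) →
    mergeclipLoop l t i (l0.length - 1)
      = mergeclipAltLoop l (mergeclipNxtAux l0 PySem.Dict.empty l0.length []) t i l0.length := by
  intro d
  induction d with
  | zero =>
      intro i l hd hlen hag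
      rw [mergeclipLoop, if_neg (by omega), mergeclipAltLoop, if_neg (by omega)]
  | succ d ih =>
      intro i l hd hlen hag
      by_cases hcond : i + 1 < l0.length
      case neg =>
        rw [mergeclipLoop, if_neg (by omega), mergeclipAltLoop, if_neg hcond]
      case pos =>
        rw [mergeclipLoop, if_pos (by omega), mergeclipAltLoop, if_pos hcond]
        by_cases heq : l.getD i 0 = l.getD (i + 1) 0
        case pos =>
          rw [beq_iff_eq.mpr heq]
          simp only [if_true]
          exact ih (i + 1) l (by omega) hlen (fun k hk => hag k (by omega))
        case neg =>
          rw [beq_eq_false_iff_ne.mpr heq]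
          simp only [Bool.false_eq_true, if_false]
          have hnxt : (mergeclipNxtAux l0 PySem.Dict.empty l0.length []).getD i none
              = firstIdxFrom l (i + 1) (l.getD i 0) := by
            rw [mergeclipNxt_getD l0 i (by omega)]
            rw [← hag i le_rfl]
            exact (firstIdxFrom_congr (l.getD i 0) hlen (fun k hk => hag k (by omega))).symm
          rw [hnxt]
          cases hfi : firstIdxFrom l (i + 1) (l.getD i 0) with
          | none =>
              have hb := mergeclipScan_bound (l := l) (i := i) (cnt := 1)
                (by intro j hj; rw [hfi] at hj; exact absurd hj (by simp))
              rw [if_pos (by omega)]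
          | some j =>
              have hb := firstIdxFrom_bounds hfi
              dsimp only
              by_cases hfar : (j : Int) > (l0.length : Int) - 2
              case pos =>
                rw [if_pos hfar]
                have hscan := mergeclipScan_bound (l := l) (i := i) (cnt := 1)
                  (by intro j' hj'; rw [hfi] at hj'; cases hj'; omega)
                rw [if_pos (by omega)]
              case neg =>
                rw [if_neg hfar]
                have hscan : mergeclipScan l i 1 = j - i :=
                  mergeclipScan_found hfi (by omega)
                rw [hscan]
                rw [if_neg (by omega)]
                by_cases hth : ((j : Int) - (i : Int)) < t
                case pos =>
                  rw [if_pos (by omega), if_pos hth, dif_pos (by omega)]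
                  have hfill : mergeclipAltFill l i (j - i) = mergeclipFill l i (j - i) := rfl
                  rw [hfill]
                  have hflen : (mergeclipFill l i (j - i)).length = l0.length := by
                    rw [mergeclipFill_length]; exact hlen
                  have hfget := mergeclipFill_getD l i (j - i) (by omega)
                  rw [mergeclipLoop_skip (mergeclipFill l i (j - i)) t (l0.length - 1)
                      (j - (i + 1)) (i + 1) j (by omega) (by omega) (by omega)
                      (fun m hm1 hm2 => by
                        rw [hfget m, hfget (m + 1), if_pos (by omega), if_pos (by omega)])]
                  refine ih j (mergeclipFill l i (j - i)) (by omega) hflen ?_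
                  intro k hk
                  rw [hfget k]
                  rcases eq_or_ne k j with rfl | hkj
                  · rw [if_pos (by omega), ← hag k (by omega)]
                    exact hb.2.2.symm
                  · rw [if_neg (by omega)]
                    exact hag k (by omega)
                case neg =>
                  rw [if_neg (by omega), if_neg hth]
                  exact ih (i + 1) l (by omega) hlen (fun k hk => hag k (by omega))

-- ===== VERDICT (by name: the statement is the Claim_ definition above) =====
theorem mergeclip_spec : Claim_equal_mergeclip := by
  intro mylist threshold _
  unfold Spec_mergeclip mergeclip mergeclip_alt
  exact mergeclip_bridge mylist threshold mylist.length 0 mylist (by omega) rfl (fun _ _ => rfl)
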